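-- pv_equiv track=rewrite | github.com/jcong58y/Mi_primer_repo | Rep_file_data_extractor_v1.py | lista_history_outputs
-- ===== SOURCE A (Python) =====
-- def lista_history_outputs(txt):
--     lista1 = []
--     lista2 = []
--     counter = 0
--     for line in txt:
--         if ("Step name " in line) or ("End of ODB Report" in line):
--             if counter > 0:
--                 lista1.append(lista2)
--                 lista2 = []
--             counter =+ 1
--         if "    History Output" in line:
--             aa = line.replace("    History Output ","").replace("  "," ").replace(" ","_").replace("\'","").strip()
--             lista2.append(aa)
--
--     return lista1
-- ===== SOURCE B (Python) =====
-- def _is_marker(line):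
--     return ("Step name " in line) or ("End of ODB Report" in line)
--
--
-- def _clean(line):
--     return line.replace("    History Output ", "").replace("  ", " ").replace(" ", "_").replace("\'", "").strip()
--
--
-- def _hist(chunk):
--     return [_clean(line) for line in chunk if "    History Output" in line]
--
--
-- def lista_history_outputs(txt):
--     # split txt into chunks: a leading pre-marker chunk, then one chunk per marker
--     # line (each chunk starting with its marker line)
--     chunks = [[]]
--     for line in txt:
--         if _is_marker(line):
--             chunks.append([])
--         chunks[-1].append(line)
--     if len(chunks) < 3:
--         return []
--     # first group spans the pre-marker prefix plus the first marker's chunk;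
--     # the chunk after the last marker is dropped
--     return [_hist(chunks[0] + chunks[1])] + [_hist(c) for c in chunks[2:-1]]
-- ===== Notes on version B (the rewrite author's own statement) =====
-- stated objective: alternative
-- what changed: B first splits the lines into marker-delimited chunks and then maps the History-Output extraction over the chunks (merging the pre-marker prefix into the first group and dropping the trailing chunk), instead of A's online state machine with a counter flag and in-place flushing.
import Mathlib
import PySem

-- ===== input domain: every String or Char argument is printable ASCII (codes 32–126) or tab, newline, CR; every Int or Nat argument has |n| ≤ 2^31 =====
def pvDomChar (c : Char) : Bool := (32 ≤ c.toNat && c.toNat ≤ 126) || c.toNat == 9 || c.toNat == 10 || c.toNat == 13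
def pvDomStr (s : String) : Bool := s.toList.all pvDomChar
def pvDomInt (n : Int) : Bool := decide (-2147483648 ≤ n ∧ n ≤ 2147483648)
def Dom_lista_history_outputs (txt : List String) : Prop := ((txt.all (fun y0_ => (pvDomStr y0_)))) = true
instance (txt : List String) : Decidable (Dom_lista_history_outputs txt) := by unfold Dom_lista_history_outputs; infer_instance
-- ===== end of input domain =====

-- B splits the lines into marker-delimited chunks and maps the extraction over them,
-- instead of A's online state machine with a counter flag; alternative decomposition, same cost.

-- ===== PORT A =====
-- loop body of A's for-loop, as a named step function over the state (lista1, lista2, counter)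
def pvAStep (s : List (List String) × List String × Int) (line : String) :
    List (List String) × List String × Int :=
  let s1 :=
    if PySem.Str.isIn "Step name " line || PySem.Str.isIn "End of ODB Report" line then
      if s.2.2 > 0 then (s.1 ++ [s.2.1], ([] : List String), (1 : Int))
      else (s.1, s.2.1, (1 : Int))
    else s
  if PySem.Str.isIn "    History Output" line then
    let aa := PySem.Str.strip (PySem.Str.replace (PySem.Str.replace (PySem.Str.replace
      (PySem.Str.replace line "    History Output " "") "  " " ") " " "_") "\'" "")
    (s1.1, s1.2.1 ++ [aa], s1.2.2)
  else s1

def lista_history_outputs (txt : List String) : List (List String) :=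
  (txt.foldl pvAStep ([], [], 0)).1

-- ===== PORT B =====
def pvIsMarker (line : String) : Bool :=
  PySem.Str.isIn "Step name " line || PySem.Str.isIn "End of ODB Report" line

def pvClean (line : String) : String :=
  PySem.Str.strip (PySem.Str.replace (PySem.Str.replace (PySem.Str.replace
    (PySem.Str.replace line "    History Output " "") "  " " ") " " "_") "\'" "")

def pvHist (chunk : List String) : List String :=
  (chunk.filter (fun l => PySem.Str.isIn "    History Output" l)).map pvClean

-- chunks[-1].append(line)
def pvAppendLast (cs : List (List String)) (x : String) : List (List String) :=
  match cs with
  | [] => [[x]]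
  | [c] => [c ++ [x]]
  | c :: rest => c :: pvAppendLast rest x

def pvBStep (cs : List (List String)) (line : String) : List (List String) :=
  pvAppendLast (if pvIsMarker line then cs ++ [[]] else cs) line

def lista_history_outputs_alt (txt : List String) : List (List String) :=
  let chunks := txt.foldl pvBStep [[]]
  if chunks.length < 3 then []
  else
    let pre := chunks.headD []
    let first := (chunks.drop 1).headD []
    let rest := chunks.drop 2
    pvHist (pre ++ first) :: rest.dropLast.map pvHist

-- ===== PRECONDITION & SPEC =====
def Spec_lista_history_outputs (txt : List String) (out : List (List String)) : Prop := out = lista_history_outputs_alt txt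
instance (txt : List String) (out : List (List String)) : Decidable (Spec_lista_history_outputs txt out) := by unfold Spec_lista_history_outputs; infer_instance

-- ===== CLAIM (what is proved, stated in full; the proofs are below) =====
def Claim_equal_lista_history_outputs : Prop := ∀ (txt : List String), Dom_lista_history_outputs txt → Spec_lista_history_outputs txt (lista_history_outputs txt)

-- ===== LEMMAS AND PROOFS =====

-- A's state, reconstructed from B's chunk list
def pvStA (cs : List (List String)) : List (List String) × List String × Int :=
  match cs with
  | [] => ([], [], 0)
  | [c0] => ([], pvHist c0, 0)
  | c0 :: c1 :: rest =>
    (((c0 ++ c1) :: rest).dropLast.map pvHist, pvHist (((c0 ++ c1) :: rest).getLastD []), 1)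

theorem pvHist_append (a b : List String) : pvHist (a ++ b) = pvHist a ++ pvHist b := by
  simp [pvHist]

theorem pvAppendLast_concat (ys : List (List String)) (c : List String) (x : String) :
    pvAppendLast (ys ++ [c]) x = ys ++ [c ++ [x]] := by
  induction ys with
  | nil => simp [pvAppendLast]
  | cons y ys ih =>
    cases ys with
    | nil => simp [pvAppendLast]
    | cons z zs => simpa [pvAppendLast] using ih

theorem pvAppendLast_cons2_concat (a b : List String) (zs : List (List String))
    (c : List String) (x : String) :
    pvAppendLast (a :: b :: (zs ++ [c])) x = a :: b :: (zs ++ [c ++ [x]]) := by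
  simpa using pvAppendLast_concat (a :: b :: zs) c x

theorem pvAppendLast_ne_nil (cs : List (List String)) (x : String) :
    pvAppendLast cs x ≠ [] := by
  cases cs with
  | nil => simp [pvAppendLast]
  | cons c rest => cases rest <;> simp [pvAppendLast]

theorem pvBStep_ne_nil (cs : List (List String)) (line : String) :
    pvBStep cs line ≠ [] := pvAppendLast_ne_nil _ _

theorem pvHist_singleton (l : String) :
    pvHist [l] = if PySem.Str.isIn "    History Output" l then [pvClean l] else [] := by
  cases h : PySem.Str.isIn "    History Output" l <;> simp only [pvHist, List.filter, h] <;> simp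

theorem pvAStep_eq (s : List (List String) × List String × Int) (line : String) :
    pvAStep s line =
      (let s1 := if pvIsMarker line then
          (if s.2.2 > 0 then (s.1 ++ [s.2.1], ([] : List String), (1 : Int))
           else (s.1, s.2.1, (1 : Int)))
        else s
       if PySem.Str.isIn "    History Output" line then (s1.1, s1.2.1 ++ [pvClean line], s1.2.2)
       else s1) := rfl

theorem pvDropLast_getLastD (l : List (List String)) (h : l ≠ []) :
    l.dropLast ++ [l.getLastD []] = l := by
  rcases List.eq_nil_or_concat l with rfl | ⟨zs, c, rfl⟩
  · exact absurd rfl h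
  · simp

theorem pvMap_dropLast_getLastD (m : List (List String)) (h : m ≠ []) :
    List.map pvHist m.dropLast ++ [pvHist (m.getLastD [])] = List.map pvHist m := by
  conv_rhs => rw [← pvDropLast_getLastD m h]
  simp

theorem pvMapDrop (x : List String) (l : List (List String)) :
    (pvHist x :: List.map pvHist l).dropLast ++ [pvHist ((x :: l).getLast?.getD [])]
      = pvHist x :: List.map pvHist l := by
  simpa using pvMap_dropLast_getLastD (x :: l) (by simp)

theorem pvStep_comm (cs : List (List String)) (hne : cs ≠ []) (line : String) :
    pvAStep (pvStA cs) line = pvStA (pvBStep cs line) := by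
  rw [pvAStep_eq]
  cases hm : pvIsMarker line
  · have hB : pvBStep cs line = pvAppendLast cs line := by simp [pvBStep, hm]
    rw [hB]
    match cs with
    | [] => exact absurd rfl hne
    | [c0] =>
      show _ = pvStA [c0 ++ [line]]
      cases hh : PySem.Str.isIn "    History Output" line <;>
        · simp [pvStA, pvHist_append, pvHist_singleton]
          all_goals simpa using hh
    | [c0, c1] =>
      show _ = pvStA [c0, c1 ++ [line]]
      cases hh : PySem.Str.isIn "    History Output" line <;>
        · simp [pvStA, pvHist_append, pvHist_singleton, List.append_assoc]
          all_goals simpa using hh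
    | c0 :: c1 :: y :: ys =>
      rcases List.eq_nil_or_concat (y :: ys) with h | ⟨zs, c, hzc⟩
      · exact absurd h (by simp)
      · rw [hzc, List.concat_eq_append, pvAppendLast_cons2_concat]
        have hd1 : ((c0 ++ c1) :: (zs ++ [c])) = (((c0 ++ c1) :: zs) ++ [c]) := by simp
        have hd2 : ((c0 ++ c1) :: (zs ++ [c ++ [line]])) = (((c0 ++ c1) :: zs) ++ [c ++ [line]]) := by
          simp
        cases hh : PySem.Str.isIn "    History Output" line <;>
          · simp only [pvStA, hd1, hd2, List.dropLast_concat, List.getLastD_concat]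
            simp [pvHist_append, pvHist_singleton]
            all_goals simpa using hh
  · have hB : pvBStep cs line = pvAppendLast (cs ++ [[]]) line := by simp [pvBStep, hm]
    rw [hB, pvAppendLast_concat cs [] line, List.nil_append]
    match cs with
    | [] => exact absurd rfl hne
    | [c0] =>
      show _ = pvStA [c0, [line]]
      cases hh : PySem.Str.isIn "    History Output" line <;>
        · simp [pvStA, pvHist_append, pvHist_singleton]
          all_goals simpa using hh
    | c0 :: c1 :: rest =>
      show _ = pvStA ((c0 :: c1 :: rest) ++ [[line]])
      have hd : ((c0 ++ c1) :: (rest ++ [[line]])) = (((c0 ++ c1) :: rest) ++ [[line]]) := by simp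
      cases hh : PySem.Str.isIn "    History Output" line <;>
        · simp only [List.cons_append, pvStA]
          rw [hd]
          simp only [List.dropLast_concat, List.getLastD_concat]
          simp [pvHist_singleton]
          all_goals exact ⟨pvMapDrop _ _, by simpa using hh⟩

theorem pvFold_comm (txt : List String) (cs : List (List String)) (hne : cs ≠ []) :
    txt.foldl pvAStep (pvStA cs) = pvStA (txt.foldl pvBStep cs) := by
  induction txt generalizing cs with
  | nil => rfl
  | cons l t ih =>
    simp only [List.foldl_cons, pvStep_comm cs hne l]
    exact ih _ (pvBStep_ne_nil cs l)

theorem lista_history_outputs_spec : Claim_equal_lista_history_outputs := by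
  intro txt _
  unfold Spec_lista_history_outputs lista_history_outputs lista_history_outputs_alt
  have h0 : (([], [], 0) : List (List String) × List String × Int) = pvStA [[]] := by
    simp [pvStA, pvHist]
  rw [h0, pvFold_comm txt [[]] (by simp)]
  generalize txt.foldl pvBStep [[]] = chunks
  match chunks with
  | [] => simp [pvStA]
  | [c0] => simp [pvStA]
  | [c0, c1] => simp [pvStA]
  | c0 :: c1 :: c2 :: rest =>
    simp [pvStA, List.dropLast_cons_of_ne_nil]
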